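-- pv_equiv track=rewrite | github.com/kashemofficial/Problem-Solving | Codeforces/(1650 A) Deletions of Two Adjacent Letters.py | solve
-- ===== SOURCE A (Python) =====
-- def solve(s1,s2):
--     c = 0
--     li = []
--     for i in s1:
--         c+=1
--         if s2 == i:
--             li.append(c)
--     ans = 0
--     for j in li:
--         if j%2 != 0:
--             ans += 1
--     if ans>0:
--         return 'YES'
--     else:
--         return "NO"
-- ===== SOURCE B (Python) =====
-- def solve(s1, s2):
--     return 'YES' if any(s1[i] == s2 for i in range(0, len(s1), 2)) else 'NO'
-- ===== Notes on version B (the rewrite author's own statement) =====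
-- stated objective: simpler
-- what changed: Instead of numbering every character, collecting a list of 1-based match positions and then counting the odd ones in a second pass, B checks directly in one pass whether any character at an even 0-based index (odd 1-based position) equals s2.
import Mathlib
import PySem

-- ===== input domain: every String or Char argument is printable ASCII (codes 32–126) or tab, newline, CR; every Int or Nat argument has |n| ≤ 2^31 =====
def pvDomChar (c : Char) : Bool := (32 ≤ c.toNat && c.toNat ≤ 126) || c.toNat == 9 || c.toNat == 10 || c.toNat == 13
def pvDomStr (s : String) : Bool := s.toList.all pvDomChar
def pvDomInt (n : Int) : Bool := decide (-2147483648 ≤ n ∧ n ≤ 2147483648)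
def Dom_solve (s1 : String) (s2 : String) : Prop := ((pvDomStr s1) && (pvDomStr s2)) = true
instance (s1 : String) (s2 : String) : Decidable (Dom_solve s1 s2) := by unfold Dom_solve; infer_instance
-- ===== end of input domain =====

-- B replaces A's two passes (number all characters, collect 1-based match positions, count the
-- odd ones) by a single direct check over the even 0-based indices; objective: simpler.

-- ===== PORT A =====
def solve (s1 : String) (s2 : String) : String :=
  -- c = 0; li = []; for i in s1: c += 1; if s2 == i: li.append(c)
  let st := s1.toList.foldl
    (fun (st : Int × List Int) i =>
      let c := st.1 + 1
      if s2.toList = [i] then (c, st.2 ++ [c]) else (c, st.2))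
    ((0 : Int), ([] : List Int))
  -- ans = 0; for j in li: if j % 2 != 0: ans += 1
  let ans := st.2.foldl (fun a j => if PySem.Int.mod j 2 ≠ 0 then a + 1 else a) (0 : Int)
  if ans > 0 then "YES" else "NO"

-- ===== PORT B =====
def solve_alt (s1 : String) (s2 : String) : String :=
  if (PySem.List.pyRange 0 (s1.toList.length : Int) 2).any
      (fun i =>
        match PySem.List.pyGet? s1.toList i with
        | some c => decide (s2.toList = [c])
        | none => false)
  then "YES" else "NO"

-- ===== PRECONDITION & SPEC =====
def Spec_solve (s1 : String) (s2 : String) (out : String) : Prop := out = solve_alt s1 s2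
instance (s1 : String) (s2 : String) (out : String) : Decidable (Spec_solve s1 s2 out) := by unfold Spec_solve; infer_instance

-- ===== CLAIM (what is proved, stated in full; the proofs are below) =====
def Claim_equal_solve : Prop := ∀ (s1 : String) (s2 : String), Dom_solve s1 s2 → Spec_solve s1 s2 (solve s1 s2)

-- ===== LEMMAS AND PROOFS =====

-- 1-based positions (offset by c0) at which s2 matches the character
def matchPos (s2 : String) : List Char → Int → List Int
  | [], _ => []
  | a :: t, c0 => (if s2.toList = [a] then [c0 + 1] else []) ++ matchPos s2 t (c0 + 1)

theorem foldA_eq (s2 : String) (l : List Char) (c0 : Int) (acc : List Int) :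
    (l.foldl
      (fun (st : Int × List Int) i =>
        let c := st.1 + 1
        if s2.toList = [i] then (c, st.2 ++ [c]) else (c, st.2))
      (c0, acc)).2 = acc ++ matchPos s2 l c0 := by
  induction l generalizing c0 acc with
  | nil => simp [matchPos]
  | cons a t ih =>
    rw [List.foldl_cons]
    dsimp only
    by_cases h : s2.toList = [a]
    · rw [if_pos h, ih]; simp [matchPos, h]
    · rw [if_neg h, ih]; simp [matchPos, h]

theorem mem_matchPos (s2 : String) (l : List Char) (c0 j : Int) :
    j ∈ matchPos s2 l c0 ↔
      ∃ k : Nat, ∃ h : k < l.length, s2.toList = [l[k]] ∧ j = c0 + 1 + k := by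
  induction l generalizing c0 with
  | nil => simp [matchPos]
  | cons a t ih =>
    simp only [matchPos, List.mem_append, ih]
    constructor
    · rintro (h | ⟨k, hk, hm, hj⟩)
      · by_cases hc : s2.toList = [a]
        · simp [hc] at h
          exact ⟨0, by simp, by simpa using hc, by omega⟩
        · simp [hc] at h
      · exact ⟨k + 1, by simpa using hk, by simpa using hm, by push_cast; omega⟩
    · rintro ⟨k, hk, hm, hj⟩
      cases k with
      | zero => exact Or.inl (by simp at hm; simp [hm]; omega)
      | succ k =>
        exact Or.inr ⟨k, by simpa using hk, by simpa using hm, by push_cast at hj ⊢; omega⟩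

theorem foldCount_eq (li : List Int) (a0 : Int) :
    li.foldl (fun a j => if PySem.Int.mod j 2 ≠ 0 then a + 1 else a) a0
      = a0 + (li.countP (fun j => decide (PySem.Int.mod j 2 ≠ 0))) := by
  induction li generalizing a0 with
  | nil => simp
  | cons j t ih =>
    rw [List.foldl_cons, ih, List.countP_cons]
    by_cases h : PySem.Int.mod j 2 ≠ 0
    · rw [if_pos h, if_pos (show (decide (PySem.Int.mod j 2 ≠ 0)) = true by simpa using h)]
      push_cast; ring
    · rw [if_neg h, if_neg (show ¬ (decide (PySem.Int.mod j 2 ≠ 0)) = true by simpa using h)]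
      push_cast; ring

theorem pymod_two (a : Int) : PySem.Int.mod a 2 = a % 2 := by
  simp [PySem.Int.mod, Int.fmod_eq_emod]

theorem solve_spec_pointwise (s1 s2 : String) : solve s1 s2 = solve_alt s1 s2 := by
  unfold solve solve_alt
  dsimp only
  rw [foldA_eq, foldCount_eq]
  simp only [List.nil_append, zero_add]
  have hiff :
      (0 : Int) < (matchPos s2 s1.toList 0).countP (fun j => decide (PySem.Int.mod j 2 ≠ 0)) ↔
      ((PySem.List.pyRange 0 (s1.toList.length : Int) 2).any
        (fun i =>
          match PySem.List.pyGet? s1.toList i with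
          | some c => decide (s2.toList = [c])
          | none => false)) = true := by
    rw [List.any_eq_true]
    have hpos : (0 : Int) < (matchPos s2 s1.toList 0).countP (fun j => decide (PySem.Int.mod j 2 ≠ 0)) ↔
        0 < (matchPos s2 s1.toList 0).countP (fun j => decide (PySem.Int.mod j 2 ≠ 0)) := by
      exact_mod_cast Int.natCast_pos.symm
    rw [hpos, List.countP_pos_iff]
    constructor
    · rintro ⟨j, hj, hodd⟩
      rw [mem_matchPos] at hj
      obtain ⟨k, hk, hm, rfl⟩ := hj
      refine ⟨(k : Int), ?_, ?_⟩
      · rw [PySem.List.mem_pyRange_iff_of_pos (by norm_num)]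
        simp only [decide_eq_true_eq, pymod_two] at hodd
        refine ⟨by positivity, by exact_mod_cast hk, ?_⟩
        omega
      · rw [PySem.List.pyGet?_natCast, List.getElem?_eq_getElem hk]
        simpa using hm
    · rintro ⟨i, hi, hp⟩
      rw [PySem.List.mem_pyRange_iff_of_pos (by norm_num)] at hi
      obtain ⟨h0, hn, hdvd⟩ := hi
      set k := i.toNat with hk
      have hik : i = (k : Int) := by omega
      have hklt : k < s1.toList.length := by omega
      rw [hik, PySem.List.pyGet?_natCast, List.getElem?_eq_getElem hklt] at hp
      simp only [decide_eq_true_eq] at hp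
      refine ⟨0 + 1 + (k : Int), (mem_matchPos s2 s1.toList 0 _).2 ⟨k, hklt, hp, rfl⟩, ?_⟩
      simp only [decide_eq_true_eq, pymod_two]
      omega
  by_cases h : ((PySem.List.pyRange 0 (s1.toList.length : Int) 2).any
        (fun i =>
          match PySem.List.pyGet? s1.toList i with
          | some c => decide (s2.toList = [c])
          | none => false)) = true
  · rw [if_pos (hiff.2 h), if_pos h]
  · rw [if_neg (fun hc => h (hiff.1 hc)), if_neg (by simpa using h)]

-- ===== VERDICT (by name: the statement is the Claim_ definition above) =====
theorem solve_spec : Claim_equal_solve := by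
  intro s1 s2 _
  exact solve_spec_pointwise s1 s2
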